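-- pv_equiv track=rewrite | github.com/igor-93/wtmm | mytracing.py | equal_pt_indices
-- ===== SOURCE A (Python) =====
-- from operator import itemgetter
--
-- def equal_pt_indices(l1, l2, reverse=False):
--     """
--     It returns the indices for each list of the first (according to list 1) common element. It is assumed that
--     elements are unique within the lists.
--     :param l1: first list
--     :param l2: second list
--     :param reverse: if True, it is the last instead of the first
--     :return: it returns the pair of indices for 2 lists. If not found, it returns (-1, -1)
--     """
--     ind_dict1 = dict((e, i) for i, e in enumerate(l1))
--     ind_dict2 = dict((e, i) for i, e in enumerate(l2))
--
--     intersected_elements = set(ind_dict1).intersection(set(ind_dict2))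
--     indices = [(ind_dict1[e], ind_dict2[e]) for e in intersected_elements]
--     indices.sort(key=itemgetter(0), reverse=reverse)
--
--     if len(indices) < 1:
--         return -1, -1
--     else:
--         return indices[0]
-- ===== SOURCE B (Python) =====
-- def equal_pt_indices(l1, l2, reverse=False):
--     """Same result as the original: one pass over the l1 index dict, keeping the
--     extreme l1-index common element, instead of materialising and sorting all pairs."""
--     d2 = {e: i for i, e in enumerate(l2)}
--     d1 = {e: i for i, e in enumerate(l1)}
--     best = None
--     for e, i1 in d1.items():
--         if e in d2 and (best is None or (i1 > best[0] if reverse else i1 < best[0])):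
--             best = (i1, d2[e])
--     return best if best is not None else (-1, -1)
-- ===== Notes on version B (the rewrite author's own statement) =====
-- stated objective: simpler
-- what changed: Instead of materialising all common (i1,i2) pairs and sorting them to take the first, B makes a single pass over the l1 index dict keeping the common element with extreme l1 index in an accumulator (no set intersection, no pair list, no sort).
import Mathlib
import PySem

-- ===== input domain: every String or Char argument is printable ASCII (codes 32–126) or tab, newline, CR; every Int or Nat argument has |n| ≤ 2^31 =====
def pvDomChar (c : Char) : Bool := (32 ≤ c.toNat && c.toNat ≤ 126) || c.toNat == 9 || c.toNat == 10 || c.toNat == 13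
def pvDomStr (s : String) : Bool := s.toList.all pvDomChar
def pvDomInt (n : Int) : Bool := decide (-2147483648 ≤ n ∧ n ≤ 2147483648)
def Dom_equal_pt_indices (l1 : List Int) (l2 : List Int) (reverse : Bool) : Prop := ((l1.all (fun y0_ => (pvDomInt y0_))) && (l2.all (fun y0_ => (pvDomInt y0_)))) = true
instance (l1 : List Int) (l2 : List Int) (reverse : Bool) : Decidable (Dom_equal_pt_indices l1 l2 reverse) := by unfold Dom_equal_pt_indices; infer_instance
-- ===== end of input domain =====

-- B replaces A's intersect-map-sort-take-head pipeline by a single fold over the l1 index dict keeping the extreme element (simpler).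


-- ===== PORT A =====
def equal_pt_indices (l1 : List Int) (l2 : List Int) (reverse : Bool) : Int × Int :=
  let ind_dict1 : PySem.Dict Int Int :=
    (PySem.List.enumerate l1).foldl (fun d p => d.insert p.2 p.1) PySem.Dict.empty
  let ind_dict2 : PySem.Dict Int Int :=
    (PySem.List.enumerate l2).foldl (fun d p => d.insert p.2 p.1) PySem.Dict.empty
  let intersected_elements : PySem.Set Int :=
    PySem.Set.inter (PySem.Set.ofList ind_dict1.keys) (PySem.Set.ofList ind_dict2.keys)
  -- ind_dict1[e] / ind_dict2[e]: e is a key of both dicts, so getD is exact (no KeyError)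
  let indices : List (Int × Int) :=
    intersected_elements.map (fun e => (ind_dict1.getD e 0, ind_dict2.getD e 0))
  let indices := PySem.List.sorted indices (fun p => p.1) reverse
  match indices with
  | [] => (-1, -1)
  | p :: _ => p

-- ===== PORT B =====
def equal_pt_indices_alt (l1 : List Int) (l2 : List Int) (reverse : Bool) : Int × Int :=
  let d2 : PySem.Dict Int Int :=
    (PySem.List.enumerate l2).foldl (fun d p => d.insert p.2 p.1) PySem.Dict.empty
  let d1 : PySem.Dict Int Int :=
    (PySem.List.enumerate l1).foldl (fun d p => d.insert p.2 p.1) PySem.Dict.empty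
  let best : Option (Int × Int) :=
    d1.items.foldl (fun best p =>
      if d2.contains p.1 &&
         (match best with
          | none => true
          | some b => if reverse then decide (b.1 < p.2) else decide (p.2 < b.1))
      then some (p.2, d2.getD p.1 0) else best) none
  best.getD (-1, -1)

-- ===== PRECONDITION & SPEC =====
def Spec_equal_pt_indices (l1 : List Int) (l2 : List Int) (reverse : Bool) (out : Int × Int) : Prop := out = equal_pt_indices_alt l1 l2 reverse
instance (l1 : List Int) (l2 : List Int) (reverse : Bool) (out : Int × Int) : Decidable (Spec_equal_pt_indices l1 l2 reverse out) := by unfold Spec_equal_pt_indices; infer_instance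

-- ===== CLAIM (what is proved, stated in full; the proofs are below) =====
def Claim_equal_equal_pt_indices : Prop := ∀ (l1 : List Int) (l2 : List Int) (reverse : Bool), Dom_equal_pt_indices l1 l2 reverse → Spec_equal_pt_indices l1 l2 reverse (equal_pt_indices l1 l2 reverse)

-- ===== LEMMAS AND PROOFS =====

-- head of an insertBy step: the new element wins only if strictly before the old head
theorem pv_head?_insertBy {α : Type} (before : α → α → Bool) (x : α) (ys : List α) :
    (PySem.List.insertBy before x ys).head? =
      some (match ys.head? with | none => x | some y => if before x y then x else y) := by
  cases ys with
  | nil => rfl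
  | cons y ys => simp [PySem.List.insertBy]; split <;> simp_all

-- the head of an insertion-sort fold is computed by a plain min/max-selection fold
theorem pv_head?_foldl_insertBy {α : Type} (before : α → α → Bool) (L : List α) (acc : List α) :
    (L.foldl (fun a x => PySem.List.insertBy before x a) acc).head? =
      L.foldl (fun h x => some (match h with | none => x | some y => if before x y then x else y))
        acc.head? := by
  induction L generalizing acc with
  | nil => rfl
  | cons x L ih =>
      simp only [List.foldl_cons]
      rw [ih, pv_head?_insertBy]

-- core equality: head of the sorted pair list = strict-selection fold over the key list
theorem pv_core (K : List Int) (c : Int → Bool) (v1 v2 : Int → Int) (rev : Bool) :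
    (match PySem.List.sorted ((K.filter c).map (fun e => (v1 e, v2 e))) (fun p => p.1) rev with
     | [] => ((-1 : Int), (-1 : Int))
     | p :: _ => p)
    = (K.foldl (fun best e =>
         if c e && (match best with
                    | none => true
                    | some b => if rev then decide (b.1 < v1 e) else decide (v1 e < b.1))
         then some (v1 e, v2 e) else best) (none : Option (Int × Int))).getD (-1, -1) := by
  have hmatch : ∀ (L : List (Int × Int)),
      (match L with | [] => ((-1 : Int), (-1 : Int)) | p :: _ => p) = L.head?.getD (-1, -1) := by
    intro L; cases L <;> rfl
  rw [hmatch]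
  cases rev with
  | false =>
      rw [PySem.List.sorted_eq_foldl_insertBy, pv_head?_foldl_insertBy]
      simp only [List.head?_nil, List.foldl_map, List.foldl_filter]
      congr 1
      apply congrFun; apply congrFun; apply congrArg
      funext h e
      by_cases hc : c e = true
      · simp only [hc, Bool.true_and, if_true]
        cases h with
        | none => rfl
        | some b => simp only []; split <;> simp_all
      · simp_all
  | true =>
      rw [PySem.List.sorted_rev_eq_foldl_insertBy, pv_head?_foldl_insertBy]
      simp only [List.head?_nil, List.foldl_map, List.foldl_filter]
      congr 1
      apply congrFun; apply congrFun; apply congrArg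
      funext h e
      by_cases hc : c e = true
      · simp only [hc, Bool.true_and, if_true]
        cases h with
        | none => rfl
        | some b => simp only []; split <;> simp_all
      · simp_all

theorem pv_contains_ofList_keys (d : PySem.Dict Int Int) (x : Int) :
    (PySem.Set.ofList d.keys).contains x = d.contains x := by
  rw [Bool.eq_iff_iff]
  simp [PySem.Set.contains, PySem.Set.mem_ofList,
    PySem.Dict.contains_iff_mem_keys]

-- ===== VERDICT (by name: the statement is the Claim_ definition above) =====
theorem equal_pt_indices_spec : Claim_equal_equal_pt_indices := by
  intro l1 l2 reverse _
  unfold Spec_equal_pt_indices equal_pt_indices equal_pt_indices_alt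
  simp only []
  set d1 : PySem.Dict Int Int :=
    (PySem.List.enumerate l1).foldl (fun d p => d.insert p.2 p.1) PySem.Dict.empty with hd1
  set d2 : PySem.Dict Int Int :=
    (PySem.List.enumerate l2).foldl (fun d p => d.insert p.2 p.1) PySem.Dict.empty with hd2
  have hnd1 : d1.keys.Nodup := by
    rw [hd1]
    exact PySem.Dict.nodup_keys_foldl_insert_key _ _ _ _ (by simp [PySem.Dict.keys, PySem.Dict.empty])
  have hofl : PySem.Set.ofList d1.keys = d1.keys :=
    PySem.Set.ofList_eq_self_of_nodup _ hnd1
  have hinter : PySem.Set.inter (PySem.Set.ofList d1.keys) (PySem.Set.ofList d2.keys)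
      = d1.keys.filter (fun e => d2.contains e) := by
    show List.filter _ _ = _
    rw [hofl]
    exact List.filter_congr (fun x _ => pv_contains_ofList_keys d2 x)
  rw [hinter]
  have hitems : d1.items = d1.keys.map (fun k => (k, d1.getD k 0)) :=
    PySem.Dict.items_eq_map_keys d1 hnd1 0
  rw [hitems, List.foldl_map]
  exact pv_core d1.keys (fun e => d2.contains e) (fun e => d1.getD e 0) (fun e => d2.getD e 0) reverse
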